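-- pv_equiv track=rewrite | github.com/gaigechunfengchumandi/chishan | utils/segment_500hz/segment_500hz_openvino.py | split_by_twos_with_indices
-- ===== SOURCE A (Python) =====
-- def split_by_twos_with_indices(lst):
--     segments = []
--     start_indices = []
--
--     # 找到所有 "2" 段的起始位置
--     for i in range(len(lst) - 1):
--         if lst[i] == 2 and (i == 0 or lst[i - 1] != 2):  # 当前元素为2，且前一个元素不为2
--             start_indices.append(i)
--
--     # 根据起始位置分割列表并记录索引范围
--     for i in range(len(start_indices)):
--         start = start_indices[i]
--         end = start_indices[i + 1] if i + 1 < len(start_indices) else len(lst)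
--         segment = lst[start:end]
--         segments.append((segment, start, end - 1))  # 添加段内容及其起始和结束索引
--
--     return segments
-- ===== SOURCE B (Python) =====
-- def split_by_twos_with_indices(lst):
--     # Single pass: keep the index of the currently open segment instead of
--     # first collecting all run starts and then re-pairing them.
--     segments = []
--     open_start = None
--     for i in range(len(lst) - 1):
--         if lst[i] == 2 and (i == 0 or lst[i - 1] != 2):
--             if open_start is not None:
--                 segments.append((lst[open_start:i], open_start, i - 1))
--             open_start = i
--     if open_start is not None:
--         segments.append((lst[open_start:], open_start, len(lst) - 1))
--     return segments
-- ===== Notes on version B (the rewrite author's own statement) =====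
-- stated objective: alternative
-- what changed: B is a single pass that maintains the currently open segment start and emits each segment as soon as the next run start is found, instead of A's two passes (first tabulating all start indices, then re-pairing consecutive starts by index arithmetic).
import Mathlib
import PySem

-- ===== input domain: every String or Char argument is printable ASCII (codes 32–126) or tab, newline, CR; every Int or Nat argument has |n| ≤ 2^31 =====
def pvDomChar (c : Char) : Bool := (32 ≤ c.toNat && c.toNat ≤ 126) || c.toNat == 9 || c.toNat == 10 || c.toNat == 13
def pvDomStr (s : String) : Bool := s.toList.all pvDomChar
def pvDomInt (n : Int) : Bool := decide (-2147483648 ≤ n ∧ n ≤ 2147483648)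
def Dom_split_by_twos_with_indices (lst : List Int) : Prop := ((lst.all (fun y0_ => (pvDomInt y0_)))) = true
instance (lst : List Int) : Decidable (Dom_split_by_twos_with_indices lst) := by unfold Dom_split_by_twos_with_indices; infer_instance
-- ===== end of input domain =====

-- B replaces A's two passes (collect all run starts, then re-pair consecutive starts by index)
-- with one pass that tracks the currently open segment start and emits segments on the fly.

-- ===== PORT A =====
def split_by_twos_with_indices (lst : List Int) : List (List Int × Int × Int) :=
  let start_indices := (PySem.List.pyRange 0 ((lst.length : Int) - 1) 1).foldl
    (fun si i =>
      if PySem.List.pyGetD lst i 0 = 2 ∧ (i = 0 ∨ PySem.List.pyGetD lst (i - 1) 0 ≠ 2)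
      then si ++ [i] else si) []
  (PySem.List.pyRange 0 (start_indices.length : Int) 1).foldl
    (fun segs i =>
      let start := PySem.List.pyGetD start_indices i 0
      let e := if i + 1 < (start_indices.length : Int)
               then PySem.List.pyGetD start_indices (i + 1) 0 else (lst.length : Int)
      segs ++ [(PySem.List.slice lst (some start) (some e), start, e - 1)]) []

-- ===== PORT B =====
def split_by_twos_with_indices_alt (lst : List Int) : List (List Int × Int × Int) :=
  let st := (PySem.List.pyRange 0 ((lst.length : Int) - 1) 1).foldl
    (fun (st : List (List Int × Int × Int) × Option Int) i =>
      if PySem.List.pyGetD lst i 0 = 2 ∧ (i = 0 ∨ PySem.List.pyGetD lst (i - 1) 0 ≠ 2)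
      then match st.2 with
           | some o => (st.1 ++ [(PySem.List.slice lst (some o) (some i), o, i - 1)], some i)
           | none   => (st.1, some i)
      else st) ([], none)
  match st.2 with
  | some o => st.1 ++ [(PySem.List.slice lst (some o) none, o, (lst.length : Int) - 1)]
  | none   => st.1

-- ===== PRECONDITION & SPEC =====
def Spec_split_by_twos_with_indices (lst : List Int) (out : List (List Int × Int × Int)) : Prop := out = split_by_twos_with_indices_alt lst
instance (lst : List Int) (out : List (List Int × Int × Int)) : Decidable (Spec_split_by_twos_with_indices lst out) := by unfold Spec_split_by_twos_with_indices; infer_instance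

-- ===== CLAIM (what is proved, stated in full; the proofs are below) =====
def Claim_equal_split_by_twos_with_indices : Prop := ∀ (lst : List Int), Dom_split_by_twos_with_indices lst → Spec_split_by_twos_with_indices lst (split_by_twos_with_indices lst)

-- ===== LEMMAS AND PROOFS =====

-- named copies of the loop bodies (definitionally equal to the lambdas in the ports)
def body1 (lst : List Int) (si : List Int) (i : Int) : List Int :=
  if PySem.List.pyGetD lst i 0 = 2 ∧ (i = 0 ∨ PySem.List.pyGetD lst (i - 1) 0 ≠ 2)
  then si ++ [i] else si

def body2 (lst : List Int) (st : List (List Int × Int × Int) × Option Int) (i : Int) :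
    List (List Int × Int × Int) × Option Int :=
  if PySem.List.pyGetD lst i 0 = 2 ∧ (i = 0 ∨ PySem.List.pyGetD lst (i - 1) 0 ≠ 2)
  then match st.2 with
       | some o => (st.1 ++ [(PySem.List.slice lst (some o) (some i), o, i - 1)], some i)
       | none   => (st.1, some i)
  else st

def fA2 (lst s : List Int) (i : Int) : List Int × Int × Int :=
  let start := PySem.List.pyGetD s i 0
  let e := if i + 1 < (s.length : Int)
           then PySem.List.pyGetD s (i + 1) 0 else (lst.length : Int)
  (PySem.List.slice lst (some start) (some e), start, e - 1)

-- segments A's second loop computes from a list of run starts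
def segsOf (lst : List Int) : List Int → List (List Int × Int × Int)
  | [] => []
  | [a] => [(PySem.List.slice lst (some a) (some (lst.length : Int)), a, (lst.length : Int) - 1)]
  | a :: b :: t => (PySem.List.slice lst (some a) (some b), a, b - 1) :: segsOf lst (b :: t)

-- all segments except the one opened by the last start
def pairSegs (lst : List Int) : List Int → List (List Int × Int × Int)
  | [] => []
  | [_] => []
  | a :: b :: t => (PySem.List.slice lst (some a) (some b), a, b - 1) :: pairSegs lst (b :: t)

theorem segsOf_eq (lst : List Int) : ∀ (s : List Int),
    segsOf lst s = pairSegs lst s ++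
      (match s.getLast? with
       | some o => [(PySem.List.slice lst (some o) (some (lst.length : Int)), o, (lst.length : Int) - 1)]
       | none => []) := by
  intro s
  induction s with
  | nil => rfl
  | cons a t ih =>
    cases t with
    | nil => simp [segsOf, pairSegs]
    | cons b t' => simp [segsOf, pairSegs, ih, List.getLast?_cons_cons]

theorem pairSegs_snoc (lst : List Int) : ∀ (s : List Int) (h : s ≠ []) (i : Int),
    pairSegs lst (s ++ [i]) =
      pairSegs lst s ++ [(PySem.List.slice lst (some (s.getLast h)) (some i), s.getLast h, i - 1)] := by
  intro s
  induction s with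
  | nil => intro h; exact absurd rfl h
  | cons a t ih =>
    intro h i
    cases t with
    | nil => simp [pairSegs]
    | cons b t' =>
      have := ih (by simp) i
      simp only [List.cons_append, pairSegs] at this ⊢
      simp [this, List.getLast_cons]

theorem pyGetD_cons_succ_of_nonneg (x : Int) (xs : List Int) (j : Int) (hj : 0 ≤ j) (d : Int) :
    PySem.List.pyGetD (x :: xs) (j + 1) d = PySem.List.pyGetD xs j d := by
  obtain ⟨n, rfl⟩ := Int.eq_ofNat_of_zero_le hj
  simp [PySem.List.pyGetD, PySem.List.pyGet?_cons_succ]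

theorem map_shift (m : Nat) (f : Int → List Int × Int × Int) :
    (PySem.List.pyRange 1 ((m : Int) + 1) 1).map f
      = (PySem.List.pyRange 0 (m : Int) 1).map (fun j => f (j + 1)) := by
  simp [PySem.List.pyRange_one, List.map_map]
  intro a _
  exact congrArg f (by ring)

theorem mapA2 (lst : List Int) : ∀ (s : List Int),
    (PySem.List.pyRange 0 (s.length : Int) 1).map (fA2 lst s) = segsOf lst s := by
  intro s
  induction s with
  | nil => simp [segsOf]
  | cons a t ih =>
    cases t with
    | nil =>
      have h1 : ((([a] : List Int)).length : Int) = 0 + 1 := by simp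
      rw [h1, PySem.List.pyRange_one_singleton]
      simp [fA2, segsOf]
    | cons b t' =>
      have hlen : (((a :: b :: t') : List Int).length : Int) = ((b :: t').length : Int) + 1 := by
        simp
      have hpos : (0 : Int) < ((a :: b :: t').length : Int) := by simp; omega
      rw [PySem.List.pyRange_one_cons hpos, List.map_cons, hlen]
      simp only [zero_add]
      rw [map_shift]
      have hhead : fA2 lst (a :: b :: t') 0 =
          (PySem.List.slice lst (some a) (some b), a, b - 1) := by
        have h2 : ((0 : Int) + 1) < (((a :: b :: t') : List Int).length : Int) := by simp
        simp only [fA2, if_pos h2]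
        have hb : PySem.List.pyGetD (a :: b :: t') ((0 : Int) + 1) 0 = b := by
          rw [show ((0:Int)+1) = ((1:Nat):Int) by norm_num, PySem.List.pyGetD_natCast]
          simp
        rw [hb]
        simp [PySem.List.pyGetD_zero]
      have htail : ((PySem.List.pyRange 0 (((b :: t').length : Nat) : Int) 1).map
            (fun j => fA2 lst (a :: b :: t') (j + 1)))
          = (PySem.List.pyRange 0 (((b :: t').length : Nat) : Int) 1).map (fA2 lst (b :: t')) := by
        refine List.map_congr_left (fun j hj => ?_)
        rw [PySem.List.mem_pyRange_one] at hj
        simp only [fA2]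
        rw [pyGetD_cons_succ_of_nonneg a (b :: t') j hj.1]
        rw [pyGetD_cons_succ_of_nonneg a (b :: t') (j + 1) (by omega)]
        have hc : (j + 1 + 1 < (((a :: b :: t') : List Int).length : Int))
            ↔ (j + 1 < (((b :: t') : List Int).length : Int)) := by
          simp
        by_cases hcc : j + 1 < (((b :: t') : List Int).length : Int)
        · rw [if_pos (hc.mpr hcc), if_pos hcc]
        · rw [if_neg (fun hx => hcc (hc.mp hx)), if_neg hcc]
      rw [htail, ih, hhead, segsOf]

-- A's second loop over the starts list is exactly segsOf
theorem loopA2_eq (lst : List Int) (s : List Int) :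
    (PySem.List.pyRange 0 (s.length : Int) 1).foldl
      (fun segs i =>
        let start := PySem.List.pyGetD s i 0
        let e := if i + 1 < (s.length : Int)
                 then PySem.List.pyGetD s (i + 1) 0 else (lst.length : Int)
        segs ++ [(PySem.List.slice lst (some start) (some e), start, e - 1)]) []
    = segsOf lst s := by
  have h : (PySem.List.pyRange 0 (s.length : Int) 1).foldl
      (fun segs i => segs ++ [fA2 lst s i]) []
      = segsOf lst s := by
    rw [PySem.List.foldl_append_singleton_eq_map]
    simpa using mapA2 lst s
  exact h

-- invariant of the joint first pass
theorem loop1_sync (lst : List Int) : ∀ (k : Nat),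
    (PySem.List.pyRange 0 (k : Int) 1).foldl (body2 lst) ([], none)
      = (pairSegs lst ((PySem.List.pyRange 0 (k : Int) 1).foldl (body1 lst) []),
         ((PySem.List.pyRange 0 (k : Int) 1).foldl (body1 lst) []).getLast?)
    ∧ ∀ x ∈ (PySem.List.pyRange 0 (k : Int) 1).foldl (body1 lst) [], 0 ≤ x ∧ x < (k : Int) := by
  intro k
  induction k with
  | zero => simp [pairSegs]
  | succ k ih =>
    have hsplit : PySem.List.pyRange 0 ((k + 1 : Nat) : Int) 1
        = PySem.List.pyRange 0 (k : Int) 1 ++ [(k : Int)] := by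
      have : ((k + 1 : Nat) : Int) = (k : Int) + 1 := by push_cast; ring
      rw [this, PySem.List.pyRange_one_succ_right (by positivity)]
    obtain ⟨ihB, ihbnd⟩ := ih
    set sA := (PySem.List.pyRange 0 (k : Int) 1).foldl (body1 lst) [] with hsA
    rw [hsplit, List.foldl_append, List.foldl_append, ihB]
    simp only [List.foldl_cons, List.foldl_nil]
    by_cases hc : PySem.List.pyGetD lst (k : Int) 0 = 2
        ∧ ((k : Int) = 0 ∨ PySem.List.pyGetD lst ((k : Int) - 1) 0 ≠ 2)
    · rw [show body1 lst sA (k : Int) = sA ++ [(k : Int)] from by unfold body1; rw [if_pos hc]]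
      constructor
      · cases hlast : sA.getLast? with
        | none =>
          have hnil : sA = [] := List.getLast?_eq_none_iff.mp hlast
          unfold body2; rw [if_pos hc]
          simp [hnil, pairSegs]
        | some o =>
          have hne : sA ≠ [] := by
            intro h; rw [h] at hlast; simp at hlast
          have hgl : sA.getLast hne = o := by
            have := List.getLast?_eq_some_getLast hne
            rw [hlast] at this; exact (Option.some_injective _ this.symm)
          rw [pairSegs_snoc lst sA hne (k : Int), hgl]
          unfold body2; rw [if_pos hc]
          simp [hlast]
      · intro x hx
        rcases List.mem_append.mp hx with h | h
        · have := ihbnd x h; push_cast; omega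
        · simp at h; subst h; push_cast; omega
    · rw [show body1 lst sA (k : Int) = sA from by unfold body1; rw [if_neg hc]]
      rw [show body2 lst (pairSegs lst sA, sA.getLast?) (k : Int)
            = (pairSegs lst sA, sA.getLast?) from by unfold body2; rw [if_neg hc]]
      refine ⟨rfl, fun x hx => ?_⟩
      have := ihbnd x hx; push_cast; omega

theorem slice_to_end (lst : List Int) (o : Int) (ho : 0 ≤ o) :
    PySem.List.slice lst (some o) (some (lst.length : Int))
      = PySem.List.slice lst (some o) none := by
  rw [PySem.List.slice_from _ ho, PySem.List.slice_toNat _ ho (by positivity)]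
  apply List.take_of_length_le
  simp

-- ===== VERDICT (by name: the statement is the Claim_ definition above) =====
theorem split_by_twos_with_indices_spec : Claim_equal_split_by_twos_with_indices := by
  intro lst _
  unfold Spec_split_by_twos_with_indices split_by_twos_with_indices split_by_twos_with_indices_alt
  rcases Nat.eq_zero_or_pos lst.length with h0 | hpos
  · rw [List.length_eq_zero_iff.mp h0]; rfl
  · obtain ⟨k, hk⟩ : ∃ k : Nat, lst.length = k + 1 := ⟨lst.length - 1, by omega⟩
    have hcast : ((lst.length : Int) - 1) = (k : Int) := by rw [hk]; push_cast; ring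
    rw [hcast]
    obtain ⟨hB, hbnd⟩ := loop1_sync lst k
    set sA := (PySem.List.pyRange 0 (k : Int) 1).foldl (body1 lst) [] with hsA
    rw [show (PySem.List.pyRange 0 (k : Int) 1).foldl
          (fun si i =>
            if PySem.List.pyGetD lst i 0 = 2 ∧ (i = 0 ∨ PySem.List.pyGetD lst (i - 1) 0 ≠ 2)
            then si ++ [i] else si) [] = sA from rfl]
    rw [show (PySem.List.pyRange 0 (k : Int) 1).foldl
          (fun (st : List (List Int × Int × Int) × Option Int) i =>
            if PySem.List.pyGetD lst i 0 = 2 ∧ (i = 0 ∨ PySem.List.pyGetD lst (i - 1) 0 ≠ 2)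
            then match st.2 with
                 | some o => (st.1 ++ [(PySem.List.slice lst (some o) (some i), o, i - 1)], some i)
                 | none   => (st.1, some i)
            else st) ([], none) = (pairSegs lst sA, sA.getLast?) from hB]
    rw [loopA2_eq lst sA, segsOf_eq lst sA]
    cases hlast : sA.getLast? with
    | none => simp
    | some o =>
      have ho : 0 ≤ o := by
        have hmem : o ∈ sA := List.mem_of_getLast? hlast
        exact (hbnd o hmem).1
      simp [slice_to_end lst o ho, hcast]
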